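-- pv_equiv track=rewrite | github.com/lawrence-dass/steeves-and-associates | backend/services/resource_allocator.py | extract_customer_from_query
-- ===== SOURCE A (Python) =====
-- def extract_customer_from_query(message: str, known_customers: list[str]) -> str | None:
--     """Best-effort customer extraction from free-text question."""
--     normalized_message = f" {message.lower()} "
--
--     best_match = None
--     best_len = 0
--
--     for customer in known_customers:
--         needle = customer.lower().strip()
--         if not needle:
--             continue
--         if f" {needle} " in normalized_message and len(needle) > best_len:
--             best_match = customer
--             best_len = len(needle)
--
--     return best_match
-- ===== SOURCE B (Python) =====
-- def extract_customer_from_query(message: str, known_customers: list[str]) -> str | None: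
--     """Best-effort customer extraction: sort candidates by needle length (desc) and return the first hit."""
--     normalized_message = f" {message.lower()} "
--     pairs = [(customer, needle)
--              for customer in known_customers
--              if (needle := customer.lower().strip())]
--     pairs.sort(key=lambda p: len(p[1]), reverse=True)
--     for customer, needle in pairs:
--         if f" {needle} " in normalized_message:
--             return customer
--     return None
-- ===== Notes on version B (the rewrite author's own statement) =====
-- stated objective: alternative
-- what changed: A scans all customers tracking the best (longest-needle) match so far; B builds the non-empty (customer, needle) pairs once, stably sorts them by descending needle length, and returns the first pair whose padded needle occurs in the padded message (early exit).
import Mathlib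
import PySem

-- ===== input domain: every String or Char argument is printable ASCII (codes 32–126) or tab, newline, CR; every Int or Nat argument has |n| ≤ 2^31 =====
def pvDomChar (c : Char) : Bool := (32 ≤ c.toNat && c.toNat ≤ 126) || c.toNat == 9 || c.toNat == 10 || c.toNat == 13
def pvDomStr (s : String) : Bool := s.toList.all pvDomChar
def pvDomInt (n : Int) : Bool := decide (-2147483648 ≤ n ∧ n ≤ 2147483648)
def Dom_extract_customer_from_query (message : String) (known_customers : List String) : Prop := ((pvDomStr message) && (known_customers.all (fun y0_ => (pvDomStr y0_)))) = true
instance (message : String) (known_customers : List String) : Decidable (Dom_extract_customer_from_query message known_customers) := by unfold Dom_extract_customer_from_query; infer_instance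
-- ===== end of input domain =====

-- B replaces A's scan-all-tracking-max with a stable sort by descending needle length plus an early-exit first-match scan; equivalence proved on all inputs (objective: alternative).


-- ===== PORT A =====
def extract_customer_from_query (message : String) (known_customers : List String) : Option String :=
  let normalized_message : List Char := ' ' :: PySem.Chars.lower message.toList ++ [' ']
  let r := known_customers.foldl
    (fun (st : Option String × Nat) customer =>
      let needle := PySem.Chars.strip (PySem.Chars.lower customer.toList)
      if needle = [] then st
      else if PySem.Chars.isIn (' ' :: (needle ++ [' '])) normalized_message
              && decide (st.2 < needle.length)
        then (some customer, needle.length)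
        else st)
    (none, 0)
  r.1

-- ===== PORT B =====
def extract_customer_from_query_alt (message : String) (known_customers : List String) : Option String :=
  let normalized_message : List Char := ' ' :: PySem.Chars.lower message.toList ++ [' ']
  let pairs := known_customers.filterMap (fun customer =>
    let needle := PySem.Chars.strip (PySem.Chars.lower customer.toList)
    if needle = [] then none else some (customer, needle))
  let sortedPairs := PySem.List.sorted pairs (fun p => p.2.length) true
  (sortedPairs.find? (fun p => PySem.Chars.isIn (' ' :: (p.2 ++ [' '])) normalized_message)).map (·.1)

-- ===== PRECONDITION & SPEC =====
def Spec_extract_customer_from_query (message : String) (known_customers : List String) (out : Option String) : Prop := out = extract_customer_from_query_alt message known_customers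
instance (message : String) (known_customers : List String) (out : Option String) : Decidable (Spec_extract_customer_from_query message known_customers out) := by unfold Spec_extract_customer_from_query; infer_instance

-- ===== CLAIM (what is proved, stated in full; the proofs are below) =====
def Claim_equal_extract_customer_from_query : Prop := ∀ (message : String) (known_customers : List String), Dom_extract_customer_from_query message known_customers → Spec_extract_customer_from_query message known_customers (extract_customer_from_query message known_customers)

-- ===== LEMMAS AND PROOFS =====

-- A's loop body, on a (customer, needle) pair
def pvStep (nm : List Char) (st : Option String × Nat) (p : String × List Char) : Option String × Nat :=
  if PySem.Chars.isIn (' ' :: (p.2 ++ [' '])) nm && decide (st.2 < p.2.length)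
    then (some p.1, p.2.length) else st

-- B's find? result, read as A's loop state
def pvEncode : Option (String × List Char) → Option String × Nat
  | none => (none, 0)
  | some q => (some q.1, q.2.length)

-- inserting a pair into a descending-by-length list commutes find? with one pvStep
lemma pv_find_insertBy (nm : List Char) (p : String × List Char) (hp : 0 < p.2.length)
    (S : List (String × List Char))
    (hS : S.Pairwise (fun a b => b.2.length ≤ a.2.length)) :
    pvEncode ((PySem.List.insertBy (fun a b => decide (b.2.length < a.2.length)) p S).find?
        (fun q => PySem.Chars.isIn (' ' :: (q.2 ++ [' '])) nm))
      = pvStep nm (pvEncode (S.find? (fun q => PySem.Chars.isIn (' ' :: (q.2 ++ [' '])) nm))) p := by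
  induction S with
  | nil =>
    by_cases hm : PySem.Chars.isIn (' ' :: (p.2 ++ [' '])) nm = true
    · simp [PySem.List.insertBy, pvStep, pvEncode, hm, hp]
    · simp [PySem.List.insertBy, pvStep, pvEncode, hm]
  | cons y ys ih =>
    rcases List.pairwise_cons.mp hS with ⟨hy, hys⟩
    by_cases hb : y.2.length < p.2.length
    · have hins : PySem.List.insertBy (fun a b => decide (b.2.length < a.2.length)) p (y :: ys)
          = p :: y :: ys := by simp [PySem.List.insertBy, hb]
      rw [hins]
      by_cases hm : PySem.Chars.isIn (' ' :: (p.2 ++ [' '])) nm = true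
      · rw [List.find?_cons_of_pos (l := y :: ys)
          (p := fun q : String × List Char => PySem.Chars.isIn (' ' :: (q.2 ++ [' '])) nm)
          (a := p) (by simpa using hm)]
        have hlt : (pvEncode ((y :: ys).find?
            (fun q => PySem.Chars.isIn (' ' :: (q.2 ++ [' '])) nm))).2 < p.2.length := by
          cases hf : (y :: ys).find? (fun q => PySem.Chars.isIn (' ' :: (q.2 ++ [' '])) nm) with
          | none => simpa [pvEncode] using hp
          | some q =>
            have hmem := List.mem_of_find?_eq_some hf
            have hle : q.2.length ≤ y.2.length := by
              rcases List.mem_cons.mp hmem with h | h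
              · simp [h]
              · exact hy q h
            simp only [pvEncode]; omega
        simp [pvStep, pvEncode, hm]
        intro hle
        exact absurd hle (Nat.not_le.mpr hlt)
      · rw [List.find?_cons_of_neg (l := y :: ys)
          (p := fun q : String × List Char => PySem.Chars.isIn (' ' :: (q.2 ++ [' '])) nm)
          (a := p) (by simpa using hm)]
        simp [pvStep, hm]
    · have hins : PySem.List.insertBy (fun a b => decide (b.2.length < a.2.length)) p (y :: ys)
          = y :: PySem.List.insertBy (fun a b => decide (b.2.length < a.2.length)) p ys := by
        simp [PySem.List.insertBy, hb]
      rw [hins]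
      by_cases hm : PySem.Chars.isIn (' ' :: (y.2 ++ [' '])) nm = true
      · rw [List.find?_cons_of_pos (l := PySem.List.insertBy (fun a b => decide (b.2.length < a.2.length)) p ys)
          (p := fun q : String × List Char => PySem.Chars.isIn (' ' :: (q.2 ++ [' '])) nm)
          (a := y) (by simpa using hm),
          List.find?_cons_of_pos (l := ys)
          (p := fun q : String × List Char => PySem.Chars.isIn (' ' :: (q.2 ++ [' '])) nm)
          (a := y) (by simpa using hm)]
        simp [pvStep, pvEncode, hb]
      · rw [List.find?_cons_of_neg (l := PySem.List.insertBy (fun a b => decide (b.2.length < a.2.length)) p ys)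
          (p := fun q : String × List Char => PySem.Chars.isIn (' ' :: (q.2 ++ [' '])) nm)
          (a := y) (by simpa using hm),
          List.find?_cons_of_neg (l := ys)
          (p := fun q : String × List Char => PySem.Chars.isIn (' ' :: (q.2 ++ [' '])) nm)
          (a := y) (by simpa using hm)]
        exact ih hys

-- folding A's step over pairs = B's find? on the descending sort of pairs
lemma pv_fold_eq_find_sorted (nm : List Char) (ps : List (String × List Char))
    (hlen : ∀ q ∈ ps, 0 < q.2.length) :
    ps.foldl (pvStep nm) (none, 0)
      = pvEncode ((PySem.List.sorted ps (fun p => p.2.length) true).find?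
          (fun q => PySem.Chars.isIn (' ' :: (q.2 ++ [' '])) nm)) := by
  induction ps using List.reverseRecOn with
  | nil => simp [PySem.List.sorted, pvEncode]
  | append_singleton ps p ih =>
    have hps : ∀ q ∈ ps, 0 < q.2.length := fun q hq => hlen q (by simp [hq])
    have hp : 0 < p.2.length := hlen p (by simp)
    rw [List.foldl_append]
    simp only [List.foldl_cons, List.foldl_nil]
    rw [ih hps]
    rw [PySem.List.sorted_rev_eq_foldl_insertBy (ps ++ [p]) (fun p => p.2.length),
        List.foldl_append]
    simp only [List.foldl_cons, List.foldl_nil]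
    rw [← PySem.List.sorted_rev_eq_foldl_insertBy ps (fun p => p.2.length)]
    exact (pv_find_insertBy nm p hp _ (PySem.List.sorted_pairwise_rev ps _)).symm

-- A's fold over customers = the pvStep fold over the filtered pairs
lemma pv_foldA_eq_fold_pairs (nm : List Char) (cs : List String)
    (st : Option String × Nat) :
    cs.foldl
      (fun (st : Option String × Nat) customer =>
        let needle := PySem.Chars.strip (PySem.Chars.lower customer.toList)
        if needle = [] then st
        else if PySem.Chars.isIn (' ' :: (needle ++ [' '])) nm && decide (st.2 < needle.length)
          then (some customer, needle.length) else st) st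
    = (cs.filterMap (fun customer =>
        let needle := PySem.Chars.strip (PySem.Chars.lower customer.toList)
        if needle = [] then none else some (customer, needle))).foldl (pvStep nm) st := by
  induction cs generalizing st with
  | nil => rfl
  | cons c cs ih =>
    simp only [List.foldl_cons, List.filterMap_cons]
    by_cases h : PySem.Chars.strip (PySem.Chars.lower c.toList) = []
    · simp only [h]
      simpa using ih st
    · simp only [if_neg h]
      rw [ih]
      simp [pvStep]

lemma pv_pairs_pos (cs : List String) :
    ∀ q ∈ cs.filterMap (fun customer =>
        let needle := PySem.Chars.strip (PySem.Chars.lower customer.toList)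
        if needle = [] then none else some (customer, needle)), 0 < q.2.length := by
  intro q hq
  rcases List.mem_filterMap.mp hq with ⟨c, _, hc⟩
  simp only at hc
  split at hc
  · exact absurd hc (by simp)
  · rename_i hne
    cases hc
    exact List.length_pos_of_ne_nil hne

lemma pv_encode_fst (o : Option (String × List Char)) :
    (pvEncode o).1 = o.map (fun x => x.1) := by cases o <;> rfl

-- ===== VERDICT (by name: the statement is the Claim_ definition above) =====
theorem extract_customer_from_query_spec : Claim_equal_extract_customer_from_query := by
  intro message known_customers _
  unfold Spec_extract_customer_from_query
  simp only [extract_customer_from_query, extract_customer_from_query_alt]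
  rw [pv_foldA_eq_fold_pairs, pv_fold_eq_find_sorted _ _ (pv_pairs_pos known_customers)]
  exact pv_encode_fst _
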